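-- pv_equiv track=rewrite | github.com/kiran-chinnapa/sites.grid | web_crawlers/crawlers/crawlers/controller/page_navigator.py | get_job_title
-- ===== SOURCE A (Python) =====
-- def get_job_title(link):
--     tokens = link.split('/')
--     jt = None
--     for token in tokens:
--         if '-' in token:
--             jt = token
--             break
--     return jt
-- ===== SOURCE B (Python) =====
-- def get_job_title(link):
--     # Locate the first hyphen, then expand to the enclosing '/'-delimited token.
--     i = link.find('-')
--     if i == -1:
--         return None
--     start = link.rfind('/', 0, i) + 1
--     end = link.find('/', i + 1)
--     if end == -1:
--         return link[start:]
--     return link[start:end]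
-- ===== Notes on version B (the rewrite author's own statement) =====
-- stated objective: alternative
-- what changed: Instead of splitting the URL into a list of all slash-delimited tokens and scanning them for one containing a hyphen, B locates the first hyphen with str.find and recovers its enclosing token directly via rfind/find of the surrounding slashes and one slice.
import Mathlib
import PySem

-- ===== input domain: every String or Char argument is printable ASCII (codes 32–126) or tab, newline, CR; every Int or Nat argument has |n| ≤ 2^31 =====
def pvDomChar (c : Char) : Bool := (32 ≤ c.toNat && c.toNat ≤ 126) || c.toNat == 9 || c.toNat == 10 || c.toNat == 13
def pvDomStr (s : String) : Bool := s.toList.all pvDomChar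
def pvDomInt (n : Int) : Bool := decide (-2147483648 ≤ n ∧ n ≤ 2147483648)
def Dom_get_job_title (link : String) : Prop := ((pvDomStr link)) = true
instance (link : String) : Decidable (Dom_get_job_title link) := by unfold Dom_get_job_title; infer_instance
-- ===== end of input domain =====

-- B replaces A's split-into-all-tokens-then-scan with find/rfind around the first
-- hyphen plus one slice; the return values are proved equal on every input.

-- ===== PORT A =====
-- the for-loop with break over the token list
def jtLoop : List (List Char) → Option String
  | [] => none
  | t :: ts => if PySem.Chars.isIn ['-'] t then some (String.ofList t) else jtLoop ts

def get_job_title (link : String) : Option String :=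
  jtLoop (PySem.Chars.splitOn link.toList ['/'])

-- ===== PORT B =====
def get_job_title_alt (link : String) : Option String :=
  let s := link.toList
  let i := PySem.Chars.find s ['-']
  if i = -1 then none
  else
    let start := PySem.Chars.rfindFrom s ['/'] 0 (some i) + 1
    let stop := PySem.Chars.findFrom s ['/'] (i + 1) none
    if stop = -1 then some (String.ofList (PySem.Chars.slice s (some start) none))
    else some (String.ofList (PySem.Chars.slice s (some start) (some stop)))

-- ===== PRECONDITION & SPEC =====
def Spec_get_job_title (link : String) (out : Option String) : Prop := out = get_job_title_alt link
instance (link : String) (out : Option String) : Decidable (Spec_get_job_title link out) := by unfold Spec_get_job_title; infer_instance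

-- ===== CLAIM (what is proved, stated in full; the proofs are below) =====
def Claim_equal_get_job_title : Prop := ∀ (link : String), Dom_get_job_title link → Spec_get_job_title link (get_job_title link)

-- ===== LEMMAS AND PROOFS =====

def splitTail (c : Char) (l : List Char) : List (List Char) :=
  match h : l.dropWhile (· ≠ c) with
  | [] => []
  | _ :: rest => rest.takeWhile (· ≠ c) :: splitTail c rest
termination_by l.length
decreasing_by
  have h1 : (l.dropWhile (· ≠ c)).length ≤ l.length := l.length_dropWhile_le _
  rw [h] at h1; simp at h1; omega

lemma splitTail_nil (c : Char) : splitTail c [] = [] := by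
  rw [splitTail.eq_def]; simp

lemma splitTail_cons_ne (c a : Char) (l : List Char) (h : a ≠ c) :
    splitTail c (a :: l) = splitTail c l := by
  rw [splitTail.eq_def, splitTail.eq_def]
  have hd : List.dropWhile (fun x => decide ¬x = c) (a :: l)
      = List.dropWhile (fun x => decide ¬x = c) l := by
    simp [List.dropWhile_cons, h]
  split <;> split <;> simp_all
  rename_i h1 h2
  have hnil : List.dropWhile (fun x => !decide (x = c)) l = [] :=
    List.dropWhile_eq_nil_iff.mpr (fun x hx => by simp [h1 x hx])
  exact absurd hnil (by simp [h2])

lemma splitTail_cons_self (c : Char) (l : List Char) :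
    splitTail c (c :: l) = l.takeWhile (· ≠ c) :: splitTail c l := by
  rw [splitTail.eq_def]
  split
  · simp_all [List.dropWhile_cons]
  · rename_i head rest h
    simp only [List.dropWhile_cons, decide_not, decide_eq_true_eq] at h
    simp at h
    obtain ⟨h1, h2⟩ := h
    subst h2; rfl

lemma splitOn_go (c : Char) : ∀ (fuel : Nat) (l cur acc : _), l.length ≤ fuel →
    PySem.Chars.splitOn.go [c] fuel l cur acc =
      acc.reverse ++ (cur.reverse ++ l.takeWhile (· ≠ c)) :: splitTail c l := by
  intro fuel
  induction fuel with
  | zero =>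
    intro l cur acc h
    have : l = [] := List.length_eq_zero_iff.mp (Nat.le_zero.mp h)
    subst this
    simp [PySem.Chars.splitOn.go, splitTail_nil]
  | succ n ih =>
    intro l cur acc h
    cases l with
    | nil => simp [PySem.Chars.splitOn.go, splitTail_nil]
    | cons a rest =>
      by_cases hac : c = a
      · subst hac
        rw [PySem.Chars.splitOn.go]
        simp only [List.isPrefixOf, BEq.rfl, Bool.true_and, List.isPrefixOf_nil_left, if_true,
          List.length_cons, List.length_nil, List.drop_succ_cons, List.drop_zero, Nat.zero_add]
        rw [ih rest [] (cur.reverse :: acc) (by simpa using h)]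
        simp [splitTail_cons_self, List.takeWhile_cons]
      · rw [PySem.Chars.splitOn.go]
        have hp : ([c].isPrefixOf (a :: rest)) = false := by
          simp [List.isPrefixOf]; exact fun h => absurd h hac
        rw [hp]
        simp only [Bool.false_eq_true, if_false]
        rw [ih rest (a :: cur) acc (by simpa using h)]
        simp [splitTail_cons_ne c a rest (Ne.symm hac), List.takeWhile_cons, Ne.symm hac]

lemma splitOn_char (c : Char) (l : List Char) :
    PySem.Chars.splitOn l [c] = l.takeWhile (· ≠ c) :: splitTail c l := by
  rw [PySem.Chars.splitOn, splitOn_go c (l.length + 1) l [] [] (by omega)]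
  simp

lemma prefix_single_false (c : Char) (t : List Char) (h : c ∉ t) :
    [c].isPrefixOf t = false := by
  cases t with
  | nil => simp [List.isPrefixOf]
  | cons a u =>
    simp only [List.mem_cons, not_or] at h
    simp [List.isPrefixOf]
    exact fun e => absurd e h.1

lemma find_go_not_mem (c : Char) : ∀ (s : List Char) (k : Nat), c ∉ s →
    PySem.Chars.find.go [c] s k = -1 := by
  intro s
  induction s with
  | nil => intro k _; rw [PySem.Chars.find.go]; simp
  | cons a t ih =>
    intro k h
    rw [PySem.Chars.find.go]
    rw [prefix_single_false c (a :: t) h]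
    simp only [Bool.false_eq_true, if_false]
    exact ih (k + 1) (fun hm => h (List.mem_cons_of_mem a hm))

lemma find_go_first (c : Char) (q : List Char) : ∀ (p : List Char) (k : Nat), c ∉ p →
    PySem.Chars.find.go [c] (p ++ c :: q) k = (k : Int) + p.length := by
  intro p
  induction p with
  | nil =>
    intro k _
    simp only [List.nil_append]
    rw [PySem.Chars.find.go]
    simp [List.isPrefixOf]
  | cons a t ih =>
    intro k h
    simp only [List.mem_cons, not_or] at h
    rw [List.cons_append, PySem.Chars.find.go]
    have : [c].isPrefixOf (a :: (t ++ c :: q)) = false := by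
      simp [List.isPrefixOf]
      exact fun e => absurd e h.1
    rw [this]
    simp only [Bool.false_eq_true, if_false]
    rw [ih (k + 1) h.2]
    simp [List.length_cons]; push_cast; ring

lemma find_not_mem (c : Char) (s : List Char) (h : c ∉ s) :
    PySem.Chars.find s [c] = -1 := by
  rw [PySem.Chars.find]; exact find_go_not_mem c s 0 h

lemma find_first (c : Char) (p q : List Char) (h : c ∉ p) :
    PySem.Chars.find (p ++ c :: q) [c] = (p.length : Int) := by
  rw [PySem.Chars.find, find_go_first c q p 0 h]; simp

lemma rfind_go_not_mem (c : Char) (s : List Char) (h : c ∉ s) : ∀ (j : Nat),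
    PySem.Chars.rfind.go s [c] j = -1 := by
  intro j
  induction j with
  | zero =>
    rw [PySem.Chars.rfind.go]
    rw [prefix_single_false c s h]
    simp
  | succ n ih =>
    rw [PySem.Chars.rfind.go]
    have : c ∉ List.drop (n + 1) s := fun hm => h (List.drop_subset _ _ hm)
    rw [prefix_single_false c _ this]
    simpa using ih

lemma rfind_go_last (c : Char) (y z : List Char) (hz : c ∉ z) : ∀ (j : Nat),
    PySem.Chars.rfind.go (y ++ c :: z) [c] (y.length + j) = (y.length : Int) := by
  intro j
  induction j with
  | zero =>
    have hd : List.drop y.length (y ++ c :: z) = c :: z := List.drop_left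
    rw [Nat.add_zero]
    cases hy : y.length with
    | zero =>
      have : y = [] := List.length_eq_zero_iff.mp hy
      subst this
      rw [PySem.Chars.rfind.go]
      simp [List.isPrefixOf]
    | succ m =>
      rw [hy] at hd
      rw [PySem.Chars.rfind.go, hd]
      simp [List.isPrefixOf]
  | succ n ih =>
    have harr : y.length + (n + 1) = (y.length + n) + 1 := by omega
    rw [harr, PySem.Chars.rfind.go]
    have hd : List.drop (y.length + n + 1) (y ++ c :: z) = List.drop n z := by
      have : y ++ c :: z = (y ++ [c]) ++ z := by simp
      rw [this]
      have hl : y.length + n + 1 = (y ++ [c]).length + n := by simp; omega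
      rw [hl]
      exact List.drop_length_add_append n
    rw [hd]
    have : c ∉ List.drop n z := fun hm => hz (List.drop_subset _ _ hm)
    rw [prefix_single_false c _ this]
    simpa using ih

lemma rfind_not_mem (c : Char) (s : List Char) (h : c ∉ s) :
    PySem.Chars.rfind s [c] = -1 := by
  rw [PySem.Chars.rfind]; exact rfind_go_not_mem c s h _

lemma rfind_last (c : Char) (y z : List Char) (hz : c ∉ z) :
    PySem.Chars.rfind (y ++ c :: z) [c] = (y.length : Int) := by
  rw [PySem.Chars.rfind]
  have : (y ++ c :: z).length = y.length + (z.length + 1) := by simp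
  rw [this]
  exact rfind_go_last c y z hz (z.length + 1)



def F (s : List Char) : Option String :=
  jtLoop (s.takeWhile (· ≠ '/') :: splitTail '/' s)

lemma isIn_single (c : Char) (t : List Char) : PySem.Chars.isIn [c] t = true ↔ c ∈ t := by
  rw [PySem.Chars.isIn_iff_infix]; exact List.singleton_infix_iff c t

lemma isIn_single_false (c : Char) (t : List Char) (h : c ∉ t) :
    PySem.Chars.isIn [c] t = false := by
  rw [Bool.eq_false_iff]
  intro hc
  exact h ((isIn_single c t).mp hc)

lemma A_eq_F (link : String) : get_job_title link = F link.toList := by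
  rw [get_job_title, splitOn_char]; rfl

lemma splitTail_of_dropWhile_nil (c : Char) (l : List Char)
    (h : l.dropWhile (· ≠ c) = []) : splitTail c l = [] := by
  rw [splitTail.eq_def]
  split
  · rfl
  · rename_i a rest h'
    rw [h] at h'; cases h'

lemma splitTail_of_dropWhile_cons (c a : Char) (l rest : List Char)
    (h : l.dropWhile (· ≠ c) = a :: rest) :
    splitTail c l = rest.takeWhile (· ≠ c) :: splitTail c rest := by
  rw [splitTail.eq_def]
  split
  · rename_i h'; rw [h] at h'; cases h'
  · rename_i a' rest' h'
    rw [h] at h'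
    cases h'
    rfl

lemma mem_of_mem_takeWhile {p : Char → Bool} {l : List Char} {a : Char}
    (h : a ∈ l.takeWhile p) : a ∈ l := List.takeWhile_subset _ h

lemma F_noHyphen : ∀ (n : Nat) (s : List Char), s.length ≤ n → '-' ∉ s → F s = none := by
  intro n
  induction n with
  | zero =>
    intro s hl _
    have : s = [] := List.length_eq_zero_iff.mp (Nat.le_zero.mp hl)
    subst this
    simp only [F, splitTail_nil, jtLoop]
    decide
  | succ n ih =>
    intro s hl hs
    have htw : PySem.Chars.isIn ['-'] (s.takeWhile (· ≠ '/')) = false :=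
      isIn_single_false _ _ (fun hm => hs (mem_of_mem_takeWhile hm))
    rw [F, jtLoop, htw]
    simp only [Bool.false_eq_true, if_false]
    cases hdw : s.dropWhile (· ≠ '/') with
    | nil => rw [splitTail_of_dropWhile_nil _ _ hdw]; rfl
    | cons a rest =>
      rw [splitTail_of_dropWhile_cons _ _ _ _ hdw]
      have hsub : rest ⊆ s := by
        intro x hx
        have : x ∈ s.dropWhile (· ≠ '/') := by rw [hdw]; exact List.mem_cons_of_mem a hx
        exact (List.dropWhile_sublist _).subset this
      have hlen : rest.length ≤ n := by
        have h1 : (s.dropWhile (· ≠ '/')).length ≤ s.length := s.length_dropWhile_le _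
        rw [hdw] at h1; simp at h1; omega
      exact ih rest hlen (fun hm => hs (hsub hm))

lemma F_skip_clean (x y : List Char) (hx : '/' ∉ x) (hd : '-' ∉ x) :
    F (x ++ '/' :: y) = F y := by
  have hall : ∀ a ∈ x, (a ≠ '/' : Bool) := by
    intro a ha; simp; exact fun e => hx (e ▸ ha)
  have htw : (x ++ '/' :: y).takeWhile (· ≠ '/') = x := by
    rw [List.takeWhile_append_of_pos hall]
    simp [List.takeWhile_cons]
  have hdw : (x ++ '/' :: y).dropWhile (· ≠ '/') = '/' :: y := by
    rw [List.dropWhile_append_of_pos hall]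
    simp [List.dropWhile_cons]
  rw [F, htw, splitTail_of_dropWhile_cons _ _ _ _ hdw, jtLoop, isIn_single_false _ _ hd]
  rfl

lemma F_skip : ∀ (n : Nat) (x y : List Char), x.length ≤ n → '-' ∉ x →
    F (x ++ '/' :: y) = F y := by
  intro n
  induction n with
  | zero =>
    intro x y hl hx
    have : x = [] := List.length_eq_zero_iff.mp (Nat.le_zero.mp hl)
    subst this
    exact F_skip_clean [] y (by simp) (by simp)
  | succ n ih =>
    intro x y hl hx
    cases hdw : x.dropWhile (· ≠ '/') with
    | nil =>
      have hslash : '/' ∉ x := by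
        intro hm
        have h1 := List.dropWhile_eq_nil_iff.mp hdw _ hm
        simp at h1
      exact F_skip_clean x y hslash hx
    | cons a rest =>
      have ha : a = '/' := by
        have := List.head?_dropWhile_not (fun x => decide (x ≠ '/')) x
        rw [hdw] at this
        simpa using this
      subst ha
      have hx' : x = x.takeWhile (· ≠ '/') ++ '/' :: rest := by
        conv_lhs => rw [← List.takeWhile_append_dropWhile (p := (· ≠ '/')) (l := x)]
        rw [hdw]
      have hrsub : rest ⊆ x := by
        intro b hb
        have : b ∈ x.dropWhile (· ≠ '/') := by rw [hdw]; exact List.mem_cons_of_mem _ hb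
        exact (List.dropWhile_sublist _).subset this
      have hlen : rest.length ≤ n := by
        have h1 : (x.dropWhile (· ≠ '/')).length ≤ x.length := x.length_dropWhile_le _
        rw [hdw] at h1; simp at h1; omega
      have key : x ++ '/' :: y = x.takeWhile (· ≠ '/') ++ '/' :: (rest ++ '/' :: y) := by
        conv_lhs => rw [hx']
        simp
      rw [key]
      rw [F_skip_clean _ _ (fun hm => by simpa using List.mem_takeWhile_imp hm)
            (fun hm => hx (mem_of_mem_takeWhile hm))]
      exact ih rest y hlen (fun hm => hx (hrsub hm))

lemma F_final (p₂ q₁ r : List Char) (h2 : '/' ∉ p₂) (hq : '/' ∉ q₁)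
    (hr : r = [] ∨ ∃ r', r = '/' :: r') :
    F (p₂ ++ '-' :: q₁ ++ r) = some (String.ofList (p₂ ++ '-' :: q₁)) := by
  have hall : ∀ a ∈ p₂ ++ '-' :: q₁, (a ≠ '/' : Bool) := by
    intro a ha
    simp only [List.mem_append, List.mem_cons] at ha
    simp
    rintro rfl
    rcases ha with h | h | h
    · exact h2 h
    · cases h
    · exact hq h
  have htwr : r.takeWhile (· ≠ '/') = [] := by
    rcases hr with rfl | ⟨r', rfl⟩
    · rfl
    · simp [List.takeWhile_cons]
  have htw : (p₂ ++ '-' :: q₁ ++ r).takeWhile (· ≠ '/') = p₂ ++ '-' :: q₁ := by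
    have hassoc : p₂ ++ '-' :: q₁ ++ r = (p₂ ++ '-' :: q₁) ++ r := by simp
    rw [hassoc, List.takeWhile_append_of_pos hall, htwr, List.append_nil]
  have hmem : PySem.Chars.isIn ['-'] (p₂ ++ '-' :: q₁) = true := by
    rw [isIn_single]; simp
  rw [F, htw, jtLoop, hmem]
  simp


lemma rfindFrom_zero_nat (s sub : List Char) (k : Nat) (hk : k ≤ s.length) :
    PySem.Chars.rfindFrom s sub 0 (some (k : Int)) =
      if PySem.Chars.rfind (s.take k) sub = -1 then -1
      else PySem.Chars.rfind (s.take k) sub := by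
  have h1 : ¬ ((s.length : Int) < (k : Int)) := by omega
  have h2 : ¬ ((k : Int) < 0) := by omega
  simp only [PySem.Chars.rfindFrom, h1, h2, if_false, lt_irrefl, Int.toNat_natCast,
    Int.toNat_zero, List.drop_zero, zero_add]

lemma exists_first_split (c : Char) (s : List Char) (h : c ∈ s) :
    ∃ p q, s = p ++ c :: q ∧ c ∉ p := by
  cases hdw : s.dropWhile (· ≠ c) with
  | nil =>
    exfalso
    have := List.dropWhile_eq_nil_iff.mp hdw _ h
    simp at this
  | cons a rest =>
    have ha : a = c := by
      have := List.head?_dropWhile_not (fun x => decide (x ≠ c)) s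
      rw [hdw] at this
      simpa using this
    rw [ha] at hdw
    refine ⟨s.takeWhile (· ≠ c), rest, ?_, fun hm => by simpa using List.mem_takeWhile_imp hm⟩
    conv_lhs => rw [← List.takeWhile_append_dropWhile (p := (· ≠ c)) (l := s)]
    rw [hdw]

lemma exists_last_split (c : Char) (s : List Char) (h : c ∈ s) :
    ∃ y z, s = y ++ c :: z ∧ c ∉ z := by
  obtain ⟨p, q, hs, hp⟩ := exists_first_split c s.reverse (by simpa using h)
  refine ⟨q.reverse, p.reverse, ?_, by simpa using hp⟩
  have := congrArg List.reverse hs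
  simpa using this


lemma take_prefix_eq (l₁ l₂ : List Char) (n : Nat) (h : l₁.length = n) :
    (l₁ ++ l₂).take n = l₁ := by
  rw [← h]; exact List.take_left

lemma drop_prefix_eq (l₁ l₂ : List Char) (n : Nat) (h : l₁.length = n) :
    (l₁ ++ l₂).drop n = l₂ := by
  rw [← h]; exact List.drop_left

lemma main_eq (link : String) : get_job_title link = get_job_title_alt link := by
  by_cases hm : '-' ∈ link.toList
  · obtain ⟨p, q, hs, hp⟩ := exists_first_split '-' link.toList hm
    have hfind : PySem.Chars.find link.toList ['-'] = (p.length : Int) := by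
      rw [hs]; exact find_first '-' p q hp
    have hlen : link.toList.length = p.length + 1 + q.length := by rw [hs]; simp; omega
    have htake : link.toList.take p.length = p := by
      rw [hs]; exact List.take_left
    have hdrop : link.toList.drop (p.length + 1) = q := by
      rw [hs]
      have h1 : p ++ '-' :: q = (p ++ ['-']) ++ q := by simp
      rw [h1]
      exact drop_prefix_eq _ _ _ (by simp)
    rw [A_eq_F]
    simp only [get_job_title_alt, hfind]
    rw [if_neg (by omega : ¬ ((p.length : Int) = -1))]
    rw [rfindFrom_zero_nat _ _ p.length (by omega), htake]
    have hcast : (p.length : Int) + 1 = ((p.length + 1 : Nat) : Int) := by push_cast; ring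
    rw [hcast, PySem.Chars.findFrom_natCast _ _ _ (by omega), hdrop]
    by_cases hpp : '/' ∈ p
    · obtain ⟨v, u, hpd, hu⟩ := exists_last_split '/' p hpp
      have hrf : PySem.Chars.rfind p ['/'] = (v.length : Int) := by
        rw [hpd]; exact rfind_last '/' v u hu
      rw [hrf, if_neg (by omega : ¬((v.length : Int) = -1))]
      have hstart : (v.length : Int) + 1 = ((v.length + 1 : Nat) : Int) := by push_cast; ring
      have hsdecomp : link.toList = (v ++ ['/']) ++ (u ++ '-' :: q) := by rw [hs, hpd]; simp
      have hdropstart : link.toList.drop (v.length + 1) = u ++ '-' :: q := by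
        rw [hsdecomp]; exact drop_prefix_eq _ _ _ (by simp)
      have hvp : '-' ∉ v := fun h => hp (by rw [hpd]; simp [h])
      have hup : '-' ∉ u := fun h => hp (by rw [hpd]; simp [h])
      have hAF : F link.toList = F (u ++ '-' :: q) := by
        have h1 : link.toList = v ++ '/' :: (u ++ '-' :: q) := by rw [hs, hpd]; simp
        rw [h1]; exact F_skip v.length v _ le_rfl hvp
      have hplen : p.length = v.length + 1 + u.length := by rw [hpd]; simp; omega
      by_cases hq : '/' ∈ q
      · obtain ⟨q₁, r', hqd, hq₁⟩ := exists_first_split '/' q hq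
        have hfq : PySem.Chars.find q ['/'] = (q₁.length : Int) := by
          rw [hqd]; exact find_first '/' q₁ r' hq₁
        rw [hfq]
        rw [if_neg (by omega : ¬((q₁.length : Int) = -1))]
        rw [if_neg (by omega : ¬(((p.length + 1 : Nat) : Int) + (q₁.length : Int) = -1))]
        have hstop : ((p.length + 1 : Nat) : Int) + (q₁.length : Int)
            = ((p.length + 1 + q₁.length : Nat) : Int) := by push_cast; ring
        rw [hstart, hstop]
        simp only [PySem.Chars.slice]
        rw [PySem.List.slice_natCast, hdropstart]
        have hq2 : u ++ '-' :: q = (u ++ '-' :: q₁) ++ '/' :: r' := by rw [hqd]; simp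
        have htk : (u ++ '-' :: q).take (p.length + 1 + q₁.length - (v.length + 1))
            = u ++ '-' :: q₁ := by
          rw [hq2]; exact take_prefix_eq _ _ _ (by simp; omega)
        rw [htk, hAF]
        have h3 : u ++ '-' :: q = u ++ '-' :: q₁ ++ '/' :: r' := by rw [hqd]; simp
        rw [h3, F_final u q₁ ('/' :: r') hu hq₁ (Or.inr ⟨r', rfl⟩)]
      · rw [find_not_mem '/' q hq, if_pos rfl, if_pos rfl]
        rw [hstart]
        simp only [PySem.Chars.slice]
        rw [PySem.List.slice_from _ (by omega), Int.toNat_natCast, hdropstart, hAF]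
        have h4 : u ++ '-' :: q = u ++ '-' :: q ++ ([] : List Char) := by simp
        conv_lhs => rw [h4]
        rw [F_final u q [] hu hq (Or.inl rfl)]
    · rw [rfind_not_mem '/' p hpp, if_pos rfl]
      rw [show ((-1 : Int) + 1) = ((0 : Nat) : Int) from by norm_num]
      by_cases hq : '/' ∈ q
      · obtain ⟨q₁, r', hqd, hq₁⟩ := exists_first_split '/' q hq
        have hfq : PySem.Chars.find q ['/'] = (q₁.length : Int) := by
          rw [hqd]; exact find_first '/' q₁ r' hq₁
        rw [hfq]
        rw [if_neg (by omega : ¬((q₁.length : Int) = -1))]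
        rw [if_neg (by omega : ¬(((p.length + 1 : Nat) : Int) + (q₁.length : Int) = -1))]
        have hstop : ((p.length + 1 : Nat) : Int) + (q₁.length : Int)
            = ((p.length + 1 + q₁.length : Nat) : Int) := by push_cast; ring
        rw [hstop]
        simp only [PySem.Chars.slice]
        rw [PySem.List.slice_natCast]
        simp only [List.drop_zero, Nat.sub_zero]
        have h3 : link.toList = (p ++ '-' :: q₁) ++ '/' :: r' := by rw [hs, hqd]; simp
        rw [h3, take_prefix_eq _ _ _ (by simp; omega)]
        have h5 : (p ++ '-' :: q₁) ++ '/' :: r' = p ++ '-' :: q₁ ++ '/' :: r' := by simp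
        rw [h5, F_final p q₁ ('/' :: r') hpp hq₁ (Or.inr ⟨r', rfl⟩)]
      · rw [find_not_mem '/' q hq, if_pos rfl, if_pos rfl]
        simp only [PySem.Chars.slice]
        rw [PySem.List.slice_from _ (by omega), Int.toNat_natCast, List.drop_zero]
        rw [hs]
        have h4 : p ++ '-' :: q = p ++ '-' :: q ++ ([] : List Char) := by simp
        conv_lhs => rw [h4]
        rw [F_final p q [] hpp hq (Or.inl rfl)]
  · rw [A_eq_F, F_noHyphen link.toList.length _ le_rfl hm]
    simp only [get_job_title_alt, find_not_mem '-' link.toList hm]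
    rfl

-- ===== VERDICT (by name: the statement is the Claim_ definition above) =====
theorem get_job_title_spec : Claim_equal_get_job_title := by
  intro link _
  show get_job_title link = get_job_title_alt link
  exact main_eq link
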